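-- pv_equiv track=rewrite | github.com/abiolaks/ai6_saturday_ml_flip_cohort_2025 | week3/src/real_estate_eda.py | _find_main_datetime_col
-- ===== SOURCE A (Python) =====
-- def _find_main_datetime_col(cols):
--     priority = [
--         "date",
--         "saledate",
--         "listdate",
--         "posteddate",
--         "transactiondate",
--         "tx_date",
--         "txdate",
--     ]
--     lm = {c.lower(): c for c in cols}
--     for key in priority:
--         for lc, orig in lm.items():
--             if key in lc:
--                 return orig
--     return cols[0] if cols else None
-- ===== SOURCE B (Python) =====
-- def _find_main_datetime_col(cols):
--     priority = [
--         "date",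
--         "saledate",
--         "listdate",
--         "posteddate",
--         "transactiondate",
--         "tx_date",
--         "txdate",
--     ]
--     lm = {c.lower(): c for c in cols}
--     best = None
--     best_rank = len(priority)
--     for lc, orig in lm.items():
--         rank = next((i for i, k in enumerate(priority) if k in lc), len(priority))
--         if rank < best_rank:
--             best, best_rank = orig, rank
--     if best is not None:
--         return best
--     return cols[0] if cols else None
-- ===== Notes on version B (the rewrite author's own statement) =====
-- stated objective: alternative
-- what changed: Replaces the nested priority-outer/dict-inner loops (restarting the dict scan for each priority key) by a single pass over the dict that computes each column's priority rank and keeps the minimum-rank, first-seen column.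
import Mathlib
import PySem

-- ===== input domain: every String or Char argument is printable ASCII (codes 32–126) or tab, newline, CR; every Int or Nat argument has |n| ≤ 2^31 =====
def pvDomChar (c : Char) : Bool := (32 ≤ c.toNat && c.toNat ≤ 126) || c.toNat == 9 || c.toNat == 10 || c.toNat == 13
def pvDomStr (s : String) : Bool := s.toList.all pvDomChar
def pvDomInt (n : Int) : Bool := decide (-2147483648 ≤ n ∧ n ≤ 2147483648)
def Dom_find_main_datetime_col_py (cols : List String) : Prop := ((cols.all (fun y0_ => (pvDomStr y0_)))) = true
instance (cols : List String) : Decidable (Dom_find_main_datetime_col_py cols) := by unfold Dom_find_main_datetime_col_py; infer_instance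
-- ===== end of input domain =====

-- B replaces A's nested loops (priority keys outer, dict entries inner) by a single
-- pass over the dict tracking the minimum-rank column; same result, similar cost.

-- ===== PORT A =====
def pvPriority : List String :=
  ["date", "saledate", "listdate", "posteddate", "transactiondate", "tx_date", "txdate"]

-- inner loop: 'for lc, orig in lm.items(): if key in lc: return orig'
def pvInnerA (key : String) : List (String × String) → Option String
  | [] => none
  | (lc, orig) :: rest =>
      if PySem.Str.isIn key lc then some orig else pvInnerA key rest

-- outer loop: 'for key in priority: …'
def pvOuterA (keys : List String) (items : List (String × String)) : Option String :=
  match keys with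
  | [] => none
  | k :: ks =>
      match pvInnerA k items with
      | some o => some o
      | none => pvOuterA ks items

def find_main_datetime_col_py (cols : List String) : Option String :=
  let lm : PySem.Dict String String :=
    cols.foldl (fun d c => d.insert (PySem.Str.lower c) c) PySem.Dict.empty
  match pvOuterA pvPriority lm.items with
  | some o => some o
  | none => cols.head?   -- 'cols[0] if cols else None'

-- ===== PORT B =====
-- rank = next((i for i, k in enumerate(priority) if k in lc), len(priority))
def pvRank (lc : String) : Nat :=
  (pvPriority.findIdx? (fun k => PySem.Str.isIn k lc)).getD pvPriority.length

-- single pass: 'for lc, orig in lm.items(): if rank < best_rank: best, best_rank = orig, rank'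
def pvBestLoop : List (String × String) → Option String → Nat → Option String × Nat
  | [], best, bestRank => (best, bestRank)
  | (lc, orig) :: rest, best, bestRank =>
      let r := pvRank lc
      if r < bestRank then pvBestLoop rest (some orig) r
      else pvBestLoop rest best bestRank

def find_main_datetime_col_py_alt (cols : List String) : Option String :=
  let lm : PySem.Dict String String :=
    cols.foldl (fun d c => d.insert (PySem.Str.lower c) c) PySem.Dict.empty
  match (pvBestLoop lm.items none pvPriority.length).1 with
  | some o => some o
  | none => cols.head?

-- ===== PRECONDITION & SPEC =====
def Spec_find_main_datetime_col_py (cols : List String) (out : Option String) : Prop := out = find_main_datetime_col_py_alt cols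
instance (cols : List String) (out : Option String) : Decidable (Spec_find_main_datetime_col_py cols out) := by unfold Spec_find_main_datetime_col_py; infer_instance

-- ===== CLAIM (what is proved, stated in full; the proofs are below) =====
def Claim_equal_find_main_datetime_col_py : Prop := ∀ (cols : List String), Dom_find_main_datetime_col_py cols → Spec_find_main_datetime_col_py cols (find_main_datetime_col_py cols)

-- ===== LEMMAS AND PROOFS =====

-- every priority key contains "date", so any priority match implies a "date" match
theorem pvKey_implies_date (k : String) (hk : k ∈ pvPriority) (lc : String)
    (h : PySem.Str.isIn k lc = true) : PySem.Str.isIn "date" lc = true := by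
  rw [PySem.Str.isIn_iff_infix] at h ⊢
  have hsub : ("date" : String).toList <:+: k.toList := by
    fin_cases hk <;> decide
  exact hsub.trans h

theorem pvRank_zero (lc : String) (h : PySem.Str.isIn "date" lc = true) :
    pvRank lc = 0 := by
  simp only [pvRank, pvPriority, List.findIdx?_cons, h, if_true, Option.getD_some]

theorem pvRank_top (lc : String) (h : PySem.Str.isIn "date" lc = false) :
    pvRank lc = pvPriority.length := by
  have hall : ∀ k ∈ pvPriority, PySem.Str.isIn k lc = false := by
    intro k hk
    cases hne : PySem.Str.isIn k lc with
    | false => rfl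
    | true => rw [← h]; exact (pvKey_implies_date k hk lc hne).symm ▸ (pvKey_implies_date k hk lc hne)
  have hnone : pvPriority.findIdx? (fun k => PySem.Str.isIn k lc) = none := by
    rw [List.findIdx?_eq_none_iff]
    intro k hk; exact hall k hk
  simp only [pvRank, hnone, Option.getD_none]

theorem pvBestLoop_stuck (items : List (String × String)) (o : String) :
    pvBestLoop items (some o) 0 = (some o, 0) := by
  induction items with
  | nil => rfl
  | cons hd tl ih =>
      obtain ⟨lc, orig⟩ := hd
      simp only [pvBestLoop, Nat.not_lt_zero, if_false, ih]

theorem pvInnerA_none (items : List (String × String))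
    (h : pvInnerA "date" items = none) :
    ∀ k ∈ pvPriority, pvInnerA k items = none := by
  induction items with
  | nil => intro k _; rfl
  | cons hd tl ih =>
      obtain ⟨lc, orig⟩ := hd
      intro k hk
      simp only [pvInnerA] at h ⊢
      cases hdate : PySem.Str.isIn "date" lc with
      | true => rw [hdate, if_pos rfl] at h; exact absurd h (by simp)
      | false =>
          rw [hdate, if_neg (by simp)] at h
          have hk' : PySem.Str.isIn k lc = false := by
            cases hne : PySem.Str.isIn k lc with
            | false => rfl
            | true => rw [← hdate]; exact (pvKey_implies_date k hk lc hne).symm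
          rw [hk', if_neg (by simp)]
          exact ih h k hk

theorem pvOuterA_eq (items : List (String × String)) :
    pvOuterA pvPriority items = pvInnerA "date" items := by
  cases h : pvInnerA "date" items with
  | some o => simp only [pvPriority, pvOuterA, h]
  | none =>
      have hall := pvInnerA_none items h
      have m : ∀ k, k ∈ pvPriority ↔
          (k = "date" ∨ k = "saledate" ∨ k = "listdate" ∨ k = "posteddate" ∨
           k = "transactiondate" ∨ k = "tx_date" ∨ k = "txdate") := by
        intro k; simp [pvPriority]
      simp only [pvPriority, pvOuterA, h,
        hall "saledate" ((m _).mpr (by tauto)), hall "listdate" ((m _).mpr (by tauto)),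
        hall "posteddate" ((m _).mpr (by tauto)), hall "transactiondate" ((m _).mpr (by tauto)),
        hall "tx_date" ((m _).mpr (by tauto)), hall "txdate" ((m _).mpr (by tauto))]

theorem pvBestLoop_eq (items : List (String × String)) :
    (pvBestLoop items none pvPriority.length).1 = pvInnerA "date" items := by
  induction items with
  | nil => rfl
  | cons hd tl ih =>
      obtain ⟨lc, orig⟩ := hd
      cases h : PySem.Str.isIn "date" lc with
      | true =>
          have hr := pvRank_zero lc h
          simp only [pvBestLoop, pvInnerA, h, if_pos, hr, pvPriority]
          rw [if_pos (by norm_num), pvBestLoop_stuck]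
      | false =>
          have hr := pvRank_top lc h
          simp only [pvBestLoop, pvInnerA, h, hr, Bool.false_eq_true, lt_self_iff_false, if_false]
          exact ih

-- ===== VERDICT (by name: the statement is the Claim_ definition above) =====
theorem find_main_datetime_col_py_spec : Claim_equal_find_main_datetime_col_py := by
  intro cols _
  unfold Spec_find_main_datetime_col_py find_main_datetime_col_py find_main_datetime_col_py_alt
  simp only [pvOuterA_eq, pvBestLoop_eq]
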